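-- pv_equiv track=rewrite | github.com/blob451/VoyageurCompass | Analytics/services/cultural_formatter.py | _convert_date_format
-- ===== SOURCE A (Python) =====
-- def _convert_date_format(django_format: str, format_type: str) -> str:
--     """Convert Django date format to Python strftime format."""
--     format_mapping = {
--         "M": "%m",
--         "d": "%d",
--         "Y": "%Y",
--         "y": "%y",
--         "j": "%d",
--         "n": "%m",
--     }
--
--     python_format = django_format
--     for django_code, python_code in format_mapping.items():
--         python_format = python_format.replace(django_code, python_code)
--
--     return python_format
-- ===== SOURCE B (Python) =====
-- def _convert_date_format(django_format: str, format_type: str) -> str: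
--     """Convert Django date format to Python strftime format (single table-driven pass)."""
--     table = {
--         "M": "%m",
--         "d": "%d",
--         "Y": "%Y",
--         "y": "%y",
--         "j": "%d",
--         "n": "%m",
--     }
--     return "".join(table.get(ch, ch) for ch in django_format)
-- ===== Notes on version B (the rewrite author's own statement) =====
-- stated objective: idiomatic
-- what changed: Replaces six sequential whole-string .replace() passes with a single character-by-character pass consulting a translation table (dict.get per character, joined once).
import Mathlib
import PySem

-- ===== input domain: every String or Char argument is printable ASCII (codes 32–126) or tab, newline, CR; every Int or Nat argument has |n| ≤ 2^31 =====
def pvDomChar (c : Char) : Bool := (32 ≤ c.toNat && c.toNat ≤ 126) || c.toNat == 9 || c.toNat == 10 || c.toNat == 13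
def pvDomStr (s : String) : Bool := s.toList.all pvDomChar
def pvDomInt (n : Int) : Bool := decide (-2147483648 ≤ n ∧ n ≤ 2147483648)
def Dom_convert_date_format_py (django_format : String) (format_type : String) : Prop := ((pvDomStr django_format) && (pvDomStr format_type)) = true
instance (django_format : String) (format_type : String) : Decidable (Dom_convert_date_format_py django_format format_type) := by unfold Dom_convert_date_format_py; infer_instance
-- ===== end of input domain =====

-- B does one table-driven pass over the characters instead of A's six sequential whole-string replace passes.

-- ===== PORT A =====
-- six sequential str.replace passes, iterating the mapping dict in insertion order
def convert_date_format_py (django_format : String) (format_type : String) : String :=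
  let format_mapping : PySem.Dict String String :=
    PySem.Dict.mk [("M", "%m"), ("d", "%d"), ("Y", "%Y"), ("y", "%y"), ("j", "%d"), ("n", "%m")]
  (PySem.Dict.items format_mapping).foldl
    (fun python_format kv => PySem.Str.replace python_format kv.1 kv.2) django_format

-- ===== PORT B =====
-- one character-by-character pass, each character looked up in the table (dict.get), joined once
def convert_date_format_py_alt (django_format : String) (format_type : String) : String :=
  let table : PySem.Dict Char String :=
    PySem.Dict.mk [('M', "%m"), ('d', "%d"), ('Y', "%Y"), ('y', "%y"), ('j', "%d"), ('n', "%m")]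
  String.ofList (PySem.Chars.join []
    (django_format.toList.map (fun ch => (PySem.Dict.getD table ch (String.ofList [ch])).toList)))

-- ===== PRECONDITION & SPEC =====
def Spec_convert_date_format_py (django_format : String) (format_type : String) (out : String) : Prop := out = convert_date_format_py_alt django_format format_type
instance (django_format : String) (format_type : String) (out : String) : Decidable (Spec_convert_date_format_py django_format format_type out) := by unfold Spec_convert_date_format_py; infer_instance

-- ===== CLAIM (what is proved, stated in full; the proofs are below) =====
def Claim_equal_convert_date_format_py : Prop := ∀ (django_format : String) (format_type : String), Dom_convert_date_format_py django_format format_type → Spec_convert_date_format_py django_format format_type (convert_date_format_py django_format format_type)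

-- ===== LEMMAS AND PROOFS =====

-- single-character replacement as a per-character expansion
def pvRep (c : Char) (nw : List Char) : Char → List Char := fun x => if x = c then nw else [x]

theorem pvGo_single (c : Char) (nw : List Char) :
    ∀ (l acc : List Char) (fuel : Nat), l.length ≤ fuel →
      PySem.Chars.replace.go [c] nw fuel l acc = acc.reverse ++ l.flatMap (pvRep c nw) := by
  intro l
  induction l with
  | nil => intro acc fuel _; cases fuel <;> simp [PySem.Chars.replace.go]
  | cons h t ih =>
    intro acc fuel hf
    cases fuel with
    | zero => simp at hf
    | succ n =>
      have hstep : PySem.Chars.replace.go [c] nw (n+1) (h :: t) acc =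
          if [c].isPrefixOf (h :: t) then
            PySem.Chars.replace.go [c] nw n (List.drop 1 (h :: t)) (nw.reverse ++ acc)
          else
            PySem.Chars.replace.go [c] nw n t (h :: acc) := rfl
      rw [hstep]
      have hn : t.length ≤ n := by simpa using hf
      by_cases hc : h = c
      · subst hc
        simp [List.isPrefixOf, ih _ n hn, pvRep]
      · have : ([c].isPrefixOf (h :: t)) = false := by
          simp [List.isPrefixOf]; exact fun e => (hc e.symm).elim
        rw [this]
        simp [ih _ n hn, pvRep, hc]

theorem pvReplace_single (c : Char) (nw s : List Char) :
    PySem.Chars.replace s [c] nw = s.flatMap (pvRep c nw) := by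
  simp [PySem.Chars.replace, pvGo_single c nw s [] s.length (le_refl _)]

theorem pvJoin_nil_flatten (l : List (List Char)) :
    PySem.Chars.join [] l = l.flatten := by
  induction l with
  | nil => simp [PySem.Chars.join, List.intercalate]
  | cons h t ih =>
    cases t with
    | nil => simp [PySem.Chars.join, List.intercalate]
    | cons h' t' =>
      rw [PySem.Chars.join_cons_cons]
      simp only [List.flatten_cons]
      rw [ih]
      simp

-- ===== VERDICT (by name: the statement is the Claim_ definition above) =====
theorem convert_date_format_py_spec : Claim_equal_convert_date_format_py := by
  intro df ft _
  unfold Spec_convert_date_format_py convert_date_format_py convert_date_format_py_alt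
  apply String.toList_injective
  simp only [List.foldl_cons, List.foldl_nil, PySem.Str.toList_replace,
    String.toList_ofList,
    show ("M" : String).toList = ['M'] by decide, show ("d" : String).toList = ['d'] by decide,
    show ("Y" : String).toList = ['Y'] by decide, show ("y" : String).toList = ['y'] by decide,
    show ("j" : String).toList = ['j'] by decide, show ("n" : String).toList = ['n'] by decide,
    show ("%m" : String).toList = ['%','m'] by decide, show ("%d" : String).toList = ['%','d'] by decide,
    show ("%Y" : String).toList = ['%','Y'] by decide, show ("%y" : String).toList = ['%','y'] by decide,
    pvReplace_single]
  rw [pvJoin_nil_flatten]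
  simp only [List.flatMap_assoc, ← List.flatMap_def]
  have hpt : ∀ x : Char,
      (pvRep 'M' ['%','m'] x).flatMap (fun a => (pvRep 'd' ['%','d'] a).flatMap
        (fun b => (pvRep 'Y' ['%','Y'] b).flatMap (fun c => (pvRep 'y' ['%','y'] c).flatMap
          (fun d => (pvRep 'j' ['%','d'] d).flatMap (fun e => pvRep 'n' ['%','m'] e)))))
      = (PySem.Dict.getD (PySem.Dict.mk [('M', "%m"), ('d', "%d"), ('Y', "%Y"), ('y', "%y"), ('j', "%d"), ('n', "%m")]) x (String.ofList [x])).toList := by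
    intro x
    by_cases hM : x = 'M'; · subst hM; decide
    by_cases hd : x = 'd'; · subst hd; decide
    by_cases hY : x = 'Y'; · subst hY; decide
    by_cases hy : x = 'y'; · subst hy; decide
    by_cases hj : x = 'j'; · subst hj; decide
    by_cases hn : x = 'n'; · subst hn; decide
    simp [pvRep, hM, hd, hY, hy, hj, hn, Ne.symm hM, Ne.symm hd, Ne.symm hY, Ne.symm hy,
      Ne.symm hj, Ne.symm hn, PySem.Dict.getD, PySem.Dict.get?]
  exact List.flatMap_congr (fun x _ => hpt x)
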